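-- pv_equiv track=rewrite | github.com/trendsetter37/HackerRank | Sherlock and the Beast/satb.py | decent
-- ===== SOURCE A (Python) =====
-- def decent(n):
-- 	n = int(n)
-- 	if n == 1:
-- 		return -1
-- 	else:
-- 		if n % 3 == 0:
-- 			return '5' * n
-- 		else:
-- 			for i in range(n, -1, -5): # This should return the largest
-- 				if i % 3 == 0 and (n-i) % 5 == 0:
-- 					return '5'*i + '3'*(n-i)
-- 			else:
-- 				return -1
-- ===== SOURCE B (Python) =====
-- def decent(n):
--     n = int(n)
--     # smallest nonnegative i with i % 3 == 0 and i % 5 == n % 5 (CRT mod 15)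
--     r = 3 * ((2 * n) % 5)
--     fives = n - ((n - r) % 15)
--     if fives < 0:
--         return -1
--     return '5' * fives + '3' * (n - fives)
-- ===== Notes on version B (the rewrite author's own statement) =====
-- stated objective: simpler
-- what changed: Replaces the descending range(n,-1,-5) search loop with a closed-form CRT computation of the number of 5s (fives = n - ((n - 3*((2n)%5)) % 15)), handling n==1, n%3==0 and the no-solution cases uniformly without iteration; Python B returns the same int -1 as A where no decent number exists, but those inputs lie outside Pre_ because the int -1 is not a value of the String return type of the ports, and negative multiples of 3 are excluded because A's empty string there is an artefact of Python's negative string repetition (B returns -1).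
-- outside the precondition, e.g. on decent(-3): A returns '', B returns -1; on decent(1): A returns -1, B returns -1; on decent(7): A returns -1, B returns -1
import Mathlib
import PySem

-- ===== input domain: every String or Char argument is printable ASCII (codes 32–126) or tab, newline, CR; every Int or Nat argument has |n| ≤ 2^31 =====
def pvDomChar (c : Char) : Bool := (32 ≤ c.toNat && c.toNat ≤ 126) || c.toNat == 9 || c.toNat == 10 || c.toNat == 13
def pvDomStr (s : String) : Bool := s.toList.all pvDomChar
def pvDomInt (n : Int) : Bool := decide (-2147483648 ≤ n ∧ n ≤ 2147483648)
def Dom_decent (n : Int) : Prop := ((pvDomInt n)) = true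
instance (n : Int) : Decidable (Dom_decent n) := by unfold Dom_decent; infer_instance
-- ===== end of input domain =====

-- B replaces A's descending search loop by a closed-form (mod-15 CRT) computation
-- of the number of 5s; objective: simpler. Python B returns A's exact values
-- (including the int -1) on every n; only negative multiples of 3 differ (see Pre_).

-- ===== PORT A =====
-- exact port of Python's c*k for a character c (k ≤ 0 gives the empty string)
def pyRep (c : Char) (k : Int) : String := String.ofList (List.replicate k.toNat c)

def decent (n : Int) : String :=
  if n = 1 then ""          -- Python returns the int -1 here: not a str, outside Pre_decent
  else if PySem.Int.mod n 3 = 0 then pyRep '5' n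
  else
    match (PySem.List.pyRange n (-1) (-5)).find?
        (fun i => (PySem.Int.mod i 3 == 0) && (PySem.Int.mod (n - i) 5 == 0)) with
    | some i => pyRep '5' i ++ pyRep '3' (n - i)
    | none => ""             -- Python returns the int -1 here: not a str, outside Pre_decent

-- ===== PORT B =====
def decent_alt (n : Int) : String :=
  let r := 3 * PySem.Int.mod (2 * n) 5
  let fives := n - PySem.Int.mod (n - r) 15
  if fives < 0 then ""       -- Python B returns the int -1 here: not a str, outside Pre_decent
  else pyRep '5' fives ++ pyRep '3' (n - fives)

-- ===== PRECONDITION & SPEC =====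
-- Pre_ excludes n ∈ {1,2,4,7} and negative n with n % 3 ≠ 0, where A returns the
-- Python int -1 — not a str, so not a value of the String return type these ports
-- must have (Python B returns the same int -1 there, matching A) — and negative
-- multiples of 3, where A's '' is an artefact of Python's negative string
-- repetition outside the natural length domain (B returns -1 there).
def Pre_decent (n : Int) : Prop := 0 ≤ n ∧ n ≠ 1 ∧ n ≠ 2 ∧ n ≠ 4 ∧ n ≠ 7
instance (n : Int) : Decidable (Pre_decent n) := by unfold Pre_decent; infer_instance
def pvWitness_decent : Int := (11)
def Spec_decent (n : Int) (out : String) : Prop := out = decent_alt n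
instance (n : Int) (out : String) : Decidable (Spec_decent n out) := by unfold Spec_decent; infer_instance

-- ===== CLAIM (what is proved, stated in full; the proofs are below) =====
def Claim_equal_decent : Prop := ∀ (n : Int), Dom_decent n → Pre_decent n → Spec_decent n (decent n)

-- ===== LEMMAS AND PROOFS =====

theorem pymod_pos (a b : Int) (hb : 0 ≤ b) : PySem.Int.mod a b = a % b := by
  simp [PySem.Int.mod, Int.fmod_eq_emod, hb]

theorem pyRange_neg5_cons (a b : Int) (h : b < a) :
    PySem.List.pyRange a b (-5) = a :: PySem.List.pyRange (a - 5) b (-5) := by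
  rw [PySem.List.pyRange_of_neg _ _ (by norm_num),
      PySem.List.pyRange_of_neg _ _ (by norm_num)]
  rw [if_pos h]
  by_cases h2 : b < a - 5
  · rw [if_pos h2]
    have hm : ((a - b + - -5 - 1) / - -5).toNat
        = ((a - 5 - b + - -5 - 1) / - -5).toNat + 1 := by
      simp only [neg_neg]; omega
    rw [hm, List.range_succ_eq_map, List.map_cons, List.map_map]
    refine congrArg₂ _ (by ring_nf) ?_
    refine List.map_congr_left ?_
    intro k _
    simp [Function.comp, Nat.succ_eq_add_one]
    ring
  · rw [if_neg h2]
    have hm : ((a - b + - -5 - 1) / - -5).toNat = 1 := by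
      simp only [neg_neg]; omega
    rw [hm]
    simp

theorem decent_spec' (n : Int) (hp : Pre_decent n) : decent n = decent_alt n := by
  obtain ⟨h0, h1, h2, h4, h7⟩ := hp
  have hm3 : PySem.Int.mod n 3 = n % 3 := pymod_pos _ _ (by norm_num)
  have hm5 : PySem.Int.mod (2 * n) 5 = (2 * n) % 5 := pymod_pos _ _ (by norm_num)
  have hm15 : ∀ a : Int, PySem.Int.mod a 15 = a % 15 := fun a => pymod_pos _ _ (by norm_num)
  have hBgen : ∀ c : Int, (n - 3 * ((2 * n) % 5)) % 15 = c →
      decent_alt n = (if n - c < 0 then "" else pyRep '5' (n - c) ++ pyRep '3' (n - (n - c))) := by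
    intro c hc
    unfold decent_alt
    simp only [hm5, hm15]
    rw [hc]
  rcases (show n % 3 = 0 ∨ n % 3 = 1 ∨ n % 3 = 2 by omega) with h | h | h
  · -- n divisible by 3 : A takes the '5'*n branch, B gets fives = n
    have hA : decent n = pyRep '5' n := by
      unfold decent
      rw [if_neg h1, hm3, h, if_pos rfl]
    have hB := hBgen 0 (by omega)
    rw [hA, hB, if_neg (by omega)]
    have e : n - 0 = n := by ring
    rw [e, sub_self]
    simp [pyRep]
  · -- n % 3 = 1 : the loop's first hit is n - 10
    have hn : 10 ≤ n := by omega
    have hA : decent n = pyRep '5' (n - 10) ++ pyRep '3' (n - (n - 10)) := by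
      unfold decent
      rw [if_neg h1, hm3, h, if_neg (by norm_num)]
      rw [pyRange_neg5_cons _ _ (by omega), pyRange_neg5_cons _ _ (by omega),
          pyRange_neg5_cons _ _ (by omega)]
      rw [List.find?_cons_of_neg (by
            simp only [Bool.and_eq_true, beq_iff_eq, not_and, hm3]
            intro hc; omega)]
      rw [List.find?_cons_of_neg (by
            simp only [Bool.and_eq_true, beq_iff_eq, not_and,
                       pymod_pos (n - 5) 3 (by norm_num)]
            intro hc; omega)]
      rw [List.find?_cons_of_pos (by
            simp only [Bool.and_eq_true, beq_iff_eq,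
                       pymod_pos (n - 5 - 5) 3 (by norm_num),
                       pymod_pos (n - (n - 5 - 5)) 5 (by norm_num)]
            omega)]
      have e : n - 5 - 5 = n - 10 := by ring
      rw [e]
    rw [hA, hBgen 10 (by omega), if_neg (by omega)]
  · -- n % 3 = 2 : the loop's first hit is n - 5
    have hn : 5 ≤ n := by omega
    have hA : decent n = pyRep '5' (n - 5) ++ pyRep '3' (n - (n - 5)) := by
      unfold decent
      rw [if_neg h1, hm3, h, if_neg (by norm_num)]
      rw [pyRange_neg5_cons _ _ (by omega), pyRange_neg5_cons _ _ (by omega)]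
      rw [List.find?_cons_of_neg (by
            simp only [Bool.and_eq_true, beq_iff_eq, not_and, hm3]
            intro hc; omega)]
      rw [List.find?_cons_of_pos (by
            simp only [Bool.and_eq_true, beq_iff_eq,
                       pymod_pos (n - 5) 3 (by norm_num),
                       pymod_pos (n - (n - 5)) 5 (by norm_num)]
            omega)]
    rw [hA, hBgen 5 (by omega), if_neg (by omega)]

-- ===== VERDICT (by name: the statement is the Claim_ definition above) =====
theorem decent_spec : Claim_equal_decent := by
  intro n _ hp
  exact decent_spec' n hp
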